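-- pv_equiv track=rewrite | github.com/Im2ql4u/Multi-Well-Quantum-Dots | src/observables/spin_amplitude_entanglement.py | enumerate_patterns
-- ===== SOURCE A (Python) =====
-- import itertools
--
-- def enumerate_patterns(N: int, n_down: int) -> list[tuple[int, ...]]:
--     """All spin patterns ``sigma in {0, 1}^N`` with ``sum(sigma) == n_down``.
--
--     The convention is ``0 = up``, ``1 = down``. There are ``C(N, n_down)``
--     such patterns; for ``N=4, n_down=2`` we get 6 patterns; for ``N=8,
--     n_down=4`` we get 70 patterns.
--     """
--     if not 0 <= n_down <= N:
--         raise ValueError(f"n_down must be in [0, N], got n_down={n_down}, N={N}.")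
--     patterns: list[tuple[int, ...]] = []
--     for down_set in itertools.combinations(range(N), n_down):
--         sigma = tuple(1 if i in down_set else 0 for i in range(N))
--         patterns.append(sigma)
--     return patterns
-- ===== SOURCE B (Python) =====
-- def enumerate_patterns(N: int, n_down: int) -> list[tuple[int, ...]]:
--     """All spin patterns sigma in {0,1}^N with sum(sigma) == n_down,
--     built by an explicit-stack backtracking walk (1 before 0) instead of itertools.
--     Prefixes are shared as linked chains (parent, bit), so a push is O(1)."""
--     if not 0 <= n_down <= N:
--         raise ValueError(f"n_down must be in [0, N], got n_down={n_down}, N={N}.")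
--     result: list[tuple[int, ...]] = []
--     stack = [(0, n_down, None)]  # (pos, ones still to place, chain of bits chosen)
--     while stack:
--         pos, rem, chain = stack.pop()
--         if pos == N:
--             bits = []
--             while chain is not None:
--                 chain, b = chain
--                 bits.append(b)
--             bits.reverse()
--             result.append(tuple(bits))
--             continue
--         if N - pos - 1 >= rem:
--             stack.append((pos + 1, rem, (chain, 0)))
--         if rem > 0:
--             stack.append((pos + 1, rem - 1, (chain, 1)))
--     return result
-- ===== Notes on version B (the rewrite author's own statement) =====
-- stated objective: alternative
-- what changed: Replaces itertools.combinations over index sets plus an O(N) membership scan per bit with an explicit-stack backtracking walk over positions (1 before 0) that shares prefixes as linked chains and emits each bit pattern directly in the same order.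
import Mathlib
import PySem

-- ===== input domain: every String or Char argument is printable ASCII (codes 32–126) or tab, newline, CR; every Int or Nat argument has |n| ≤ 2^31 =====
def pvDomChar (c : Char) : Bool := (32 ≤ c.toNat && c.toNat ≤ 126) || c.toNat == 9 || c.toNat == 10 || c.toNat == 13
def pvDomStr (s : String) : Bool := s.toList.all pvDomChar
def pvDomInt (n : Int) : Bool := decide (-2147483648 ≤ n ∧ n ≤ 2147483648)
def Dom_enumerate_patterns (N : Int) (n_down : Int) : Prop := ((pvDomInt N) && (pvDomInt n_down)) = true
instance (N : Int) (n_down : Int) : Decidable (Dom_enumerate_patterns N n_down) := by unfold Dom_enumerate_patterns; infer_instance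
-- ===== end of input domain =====

-- B replaces itertools.combinations + per-bit membership scans with a recursive
-- backtracking walk emitting bit patterns directly (alternative decomposition, same order).

-- ===== PORT A =====
-- itertools.combinations(l, k) in its lexicographic emission order
def pvCombos : List Int → Nat → List (List Int)
  | _, 0 => [[]]
  | [], _ + 1 => []
  | x :: xs, k + 1 => (pvCombos xs k).map (x :: ·) ++ pvCombos xs (k + 1)

def enumerate_patterns (N : Int) (n_down : Int) : List (List Int) :=
  if 0 ≤ n_down ∧ n_down ≤ N then
    (pvCombos (PySem.List.pyRange 0 N 1) n_down.toNat).map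
      (fun down_set => (PySem.List.pyRange 0 N 1).map
        (fun i => if down_set.contains i then (1 : Int) else 0))
  else []   -- raise ValueError (excluded by Pre_)

-- ===== PORT B =====
-- termination measure facts for the stack loop below (cited by decreasing_by)
theorem pvMeasA (m S : Nat) : 3 ^ m + (3 ^ m + S) < 3 ^ (m + 1) + S := by
  have h := Nat.one_le_pow m 3 (by norm_num)
  simp only [pow_succ]; omega
theorem pvMeasB (m S : Nat) : 3 ^ m + S < 3 ^ (m + 1) + S := by
  have h := Nat.one_le_pow m 3 (by norm_num)
  simp only [pow_succ]; omega
theorem pvMeasC (m S : Nat) : S < 3 ^ (m + 1) + S := by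
  have h := Nat.one_le_pow (m + 1) 3 (by norm_num)
  omega

-- the while-stack loop; a frame (m, rem, rev) is (N - pos, rem, chain of chosen bits,
-- newest first — the Python linked chain is this reversed list); stack head = top.
-- Python pushes the 0-branch then the 1-branch, so the pop order is 1-branch first:
-- each of the four push combinations is one branch below; the chain-unwinding
-- while loop at pos == N is the List.reverse at emit.
def pvLoop : List (Nat × Nat × List Int) → List (List Int)
  | [] => []
  | (0, _, rev) :: stack => rev.reverse :: pvLoop stack
  | (m + 1, rem, rev) :: stack =>
      if rem > 0 then
        if m ≥ rem then
          pvLoop ((m, rem - 1, 1 :: rev) :: (m, rem, 0 :: rev) :: stack)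
        else
          pvLoop ((m, rem - 1, 1 :: rev) :: stack)
      else
        if m ≥ rem then
          pvLoop ((m, rem, 0 :: rev) :: stack)
        else
          pvLoop stack
termination_by stack => (stack.map (fun f => 3 ^ f.1)).sum
decreasing_by
  all_goals
    simp only [List.map_cons, List.sum_cons]
    first
      | exact pvMeasA _ _
      | exact pvMeasB _ _
      | exact pvMeasC _ _
      | (simp only [pow_zero]; omega)

def enumerate_patterns_alt (N : Int) (n_down : Int) : List (List Int) :=
  if 0 ≤ n_down ∧ n_down ≤ N then pvLoop [(N.toNat, n_down.toNat, [])]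
  else []   -- raise ValueError (excluded by Pre_)

-- ===== PRECONDITION & SPEC =====
-- A raises ValueError exactly when the guard 0 <= n_down <= N fails.
def Pre_enumerate_patterns (N : Int) (n_down : Int) : Prop := 0 ≤ n_down ∧ n_down ≤ N
instance (N : Int) (n_down : Int) : Decidable (Pre_enumerate_patterns N n_down) := by
  unfold Pre_enumerate_patterns; infer_instance
def pvWitness_enumerate_patterns : Int × Int := (4, 2)

def Spec_enumerate_patterns (N : Int) (n_down : Int) (out : List (List Int)) : Prop :=
  out = enumerate_patterns_alt N n_down
instance (N : Int) (n_down : Int) (out : List (List Int)) : Decidable (Spec_enumerate_patterns N n_down out) := by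
  unfold Spec_enumerate_patterns; infer_instance

-- ===== CLAIM =====
def Claim_equal_enumerate_patterns : Prop := ∀ (N : Int) (n_down : Int), Dom_enumerate_patterns N n_down → Pre_enumerate_patterns N n_down → Spec_enumerate_patterns N n_down (enumerate_patterns N n_down)

-- ===== LEMMAS AND PROOFS =====

-- canonical pattern list: all {0,1}-lists of length m with k ones, 1-branch first
def pvPats : Nat → Nat → List (List Int)
  | 0, _ => [[]]
  | m + 1, k =>
      (if k > 0 then (pvPats m (k - 1)).map ((1 : Int) :: ·) else []) ++
      (if m ≥ k then (pvPats m k).map ((0 : Int) :: ·) else [])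

theorem pvLoop_eq_pats (stack : List (Nat × Nat × List Int)) :
    pvLoop stack = stack.flatMap (fun f => (pvPats f.1 f.2.1).map (f.2.2.reverse ++ ·)) := by
  induction stack using pvLoop.induct with
  | case1 => simp [pvLoop]
  | case2 rem pre stack ih => simp [pvLoop, pvPats, ih]
  | case3 m rem pre stack h1 h2 ih =>
      rw [pvLoop, if_pos h1, if_pos h2, ih]
      simp [pvPats, h1, h2, List.map_map, Function.comp_def]
  | case4 m rem pre stack h1 h2 ih =>
      rw [pvLoop, if_pos h1, if_neg h2, ih]
      simp [pvPats, h1, h2, List.map_map, Function.comp_def]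
  | case5 m rem pre stack h1 h2 ih =>
      rw [pvLoop, if_neg h1, if_pos h2, ih]
      simp [pvPats, h1, h2, List.map_map, Function.comp_def]
  | case6 m rem pre stack h1 h2 ih =>
      rw [pvLoop, if_neg h1, if_neg h2, ih]
      simp [pvPats, h1, h2]

theorem pvCombos_nil_of_lt (l : List Int) (k : Nat) (h : l.length < k) :
    pvCombos l k = [] := by
  induction l generalizing k with
  | nil => cases k with
    | zero => omega
    | succ k => rfl
  | cons x xs ih =>
      cases k with
      | zero => omega
      | succ k =>
          simp only [pvCombos]
          rw [ih k (by simpa using Nat.lt_of_succ_lt_succ h),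
              ih (k+1) (by simp at h ⊢; omega)]
          rfl

theorem pvCombos_mem_sub (l : List Int) (k : Nat) (ds : List Int)
    (h : ds ∈ pvCombos l k) : ∀ i ∈ ds, i ∈ l := by
  induction l generalizing k ds with
  | nil =>
      cases k with
      | zero => simp [pvCombos] at h; simp [h]
      | succ k => simp [pvCombos] at h
  | cons x xs ih =>
      cases k with
      | zero => simp [pvCombos] at h; simp [h]
      | succ k =>
          simp only [pvCombos, List.mem_append, List.mem_map] at h
          rcases h with ⟨ds', hds', rfl⟩ | h
          · intro i hi
            rcases List.mem_cons.mp hi with rfl | hi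
            · exact List.mem_cons_self
            · exact List.mem_cons_of_mem _ (ih k ds' hds' i hi)
          · intro i hi; exact List.mem_cons_of_mem _ (ih (k+1) ds h i hi)

theorem pvKey (l : List Int) (hl : l.Nodup) (k : Nat) (hk : k ≤ l.length) :
    (pvCombos l k).map
      (fun ds => l.map (fun i => if ds.contains i then (1 : Int) else 0))
      = pvPats l.length k := by
  induction l generalizing k with
  | nil =>
      have hk0 : k = 0 := Nat.le_zero.mp hk
      subst hk0
      simp [pvCombos, pvPats]
  | cons x xs ih =>
      have hx : x ∉ xs := (List.nodup_cons.mp hl).1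
      have hxs : xs.Nodup := (List.nodup_cons.mp hl).2
      cases k with
      | zero =>
          simp only [pvCombos, List.map_cons, List.length_cons, pvPats]
          have : (pvPats xs.length 0).map ((0 : Int) :: ·)
              = [(0 : Int) :: xs.map (fun _ => (0 : Int))] := by
            rw [← ih hxs 0 (Nat.zero_le _)]
            simp [pvCombos]
          simp [this]
      | succ k =>
          simp only [pvCombos, List.map_append, List.map_map, List.length_cons, pvPats]
          congr 1
          · -- 1-branch
            have hk' : k ≤ xs.length := by simpa using hk
            rw [if_pos (Nat.succ_pos k)]
            simp only [Nat.add_sub_cancel]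
            rw [← ih hxs k hk', List.map_map]
            apply List.map_congr_left
            intro ds hds
            have hsub := pvCombos_mem_sub xs k ds hds
            simp only [Function.comp_apply, List.map_cons]
            have hhead : ((x :: ds).contains x) = true := by simp
            rw [hhead]
            congr 1
            apply List.map_congr_left
            intro i hi
            have hne : i ≠ x := fun h => hx (h ▸ hi)
            simp [hne]
          · -- 0-branch
            by_cases hge : xs.length ≥ k + 1
            · rw [if_pos hge, ← ih hxs (k+1) hge, List.map_map]
              apply List.map_congr_left
              intro ds hds
              have hsub := pvCombos_mem_sub xs (k+1) ds hds
              simp only [Function.comp_apply, List.map_cons]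
              have hhead : ((ds).contains x) = false := by
                by_contra hc
                simp only [Bool.not_eq_false, List.contains_eq_mem, decide_eq_true_eq] at hc
                exact hx (hsub x hc)
              rw [hhead]
              simp
            · rw [if_neg hge, pvCombos_nil_of_lt xs (k+1) (by omega)]
              rfl

-- ===== VERDICT =====
theorem enumerate_patterns_spec : Claim_equal_enumerate_patterns := by
  intro N n_down _ hpre
  unfold Pre_enumerate_patterns at hpre
  unfold Spec_enumerate_patterns enumerate_patterns enumerate_patterns_alt
  rw [if_pos hpre, if_pos hpre]
  obtain ⟨h0, hN⟩ := hpre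
  have hN0 : (0 : Int) ≤ N := le_trans h0 hN
  have hlen : (PySem.List.pyRange 0 N 1).length = N.toNat := by
    rw [PySem.List.length_pyRange_one]; omega
  have hnd : (PySem.List.pyRange 0 N 1).Nodup := PySem.List.nodup_pyRange_one 0 N
  have hk : n_down.toNat ≤ (PySem.List.pyRange 0 N 1).length := by
    rw [hlen]; omega
  rw [pvKey _ hnd _ hk, hlen, pvLoop_eq_pats]
  simp
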